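-- pv_equiv track=rewrite | github.com/sebkeil/KR-Project01-Group02 | final/heur.py | f
-- ===== SOURCE A (Python) =====
-- def f(clauses, literal):
--     smallest_clauses_size = len(min(clauses, key=len))
--     number_of_occurances = 0
--     for clause in clauses:
--         if len(clause) == smallest_clauses_size:
--             if literal in clause or -literal in clause:
--                 number_of_occurances += 1
--     return number_of_occurances
-- ===== SOURCE B (Python) =====
-- def f(clauses, literal):
--     best = None
--     count = 0
--     for clause in clauses:
--         n = len(clause)
--         if best is None or n < best:
--             best = n
--             count = 1 if (literal in clause or -literal in clause) else 0
--         elif n == best: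
--             if literal in clause or -literal in clause:
--                 count += 1
--     return count
-- ===== Notes on version B (the rewrite author's own statement) =====
-- stated objective: alternative
-- what changed: single streaming pass maintaining the best (smallest) length seen and a running count with reset-on-strictly-smaller, instead of a min() pass followed by a second counting pass
import Mathlib
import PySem

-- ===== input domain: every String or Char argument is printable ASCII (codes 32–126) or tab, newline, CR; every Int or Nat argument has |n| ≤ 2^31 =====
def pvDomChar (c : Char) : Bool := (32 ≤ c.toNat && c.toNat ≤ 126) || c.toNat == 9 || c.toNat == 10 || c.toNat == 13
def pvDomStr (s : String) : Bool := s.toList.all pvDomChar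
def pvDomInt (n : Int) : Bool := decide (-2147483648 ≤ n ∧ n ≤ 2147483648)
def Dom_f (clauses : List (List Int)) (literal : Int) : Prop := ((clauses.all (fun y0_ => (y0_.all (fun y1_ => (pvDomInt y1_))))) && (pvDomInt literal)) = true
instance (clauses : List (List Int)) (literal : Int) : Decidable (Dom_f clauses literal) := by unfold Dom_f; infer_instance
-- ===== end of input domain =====

-- B replaces A's min()-then-count two passes by one streaming pass (best length + running count); return values proved equal on nonempty clauses.


-- ===== PORT A =====
def f (clauses : List (List Int)) (literal : Int) : Int :=
  match PySem.List.min? clauses (fun c => c.length) with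
  | none => 0   -- unreachable under Pre_f: Python's min raises ValueError on []
  | some mcl =>
    let smallest := mcl.length
    clauses.foldl (fun acc clause =>
      if clause.length = smallest then
        if literal ∈ clause ∨ -literal ∈ clause then acc + 1 else acc
      else acc) 0

-- ===== PORT B =====
-- the streaming loop of Source B: best-so-far length (None before the first clause) and running count
def fAltLoop (literal : Int) (best : Option Nat) (cnt : Int) : List (List Int) → Int
  | [] => cnt
  | c :: rest =>
    let n := c.length
    match best with
    | none => fAltLoop literal (some n) (if literal ∈ c ∨ -literal ∈ c then 1 else 0) rest
    | some b =>
      if n < b then fAltLoop literal (some n) (if literal ∈ c ∨ -literal ∈ c then 1 else 0) rest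
      else if n = b then fAltLoop literal (some b) (if literal ∈ c ∨ -literal ∈ c then cnt + 1 else cnt) rest
      else fAltLoop literal (some b) cnt rest

def f_alt (clauses : List (List Int)) (literal : Int) : Int :=
  fAltLoop literal none 0 clauses

-- ===== PRECONDITION & SPEC =====
-- Pre_f excludes only the empty clause list, on which Python A raises ValueError (min of empty sequence)
def Pre_f (clauses : List (List Int)) (literal : Int) : Prop := clauses ≠ []
instance (clauses : List (List Int)) (literal : Int) : Decidable (Pre_f clauses literal) := by unfold Pre_f; infer_instance
def pvWitness_f : List (List Int) × Int := ([[1, -2], [2]], 2)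

def Spec_f (clauses : List (List Int)) (literal : Int) (out : Int) : Prop := out = f_alt clauses literal
instance (clauses : List (List Int)) (literal : Int) (out : Int) : Decidable (Spec_f clauses literal out) := by unfold Spec_f; infer_instance

-- ===== CLAIM (what is proved, stated in full; the proofs are below) =====
def Claim_equal_f : Prop := ∀ (clauses : List (List Int)) (literal : Int), Dom_f clauses literal → Pre_f clauses literal → Spec_f clauses literal (f clauses literal)

-- ===== LEMMAS AND PROOFS =====

-- count of clauses of length m containing literal or its negation
def countMin (literal : Int) (m : Nat) : List (List Int) → Int
  | [] => 0
  | c :: rest => (if c.length = m ∧ (literal ∈ c ∨ -literal ∈ c) then 1 else 0) + countMin literal m rest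

-- running minimum of the lengths, seeded with b
def natMin : List (List Int) → Nat → Nat
  | [], b => b
  | c :: rest, b => natMin rest (min b c.length)

theorem natMin_le (cs : List (List Int)) (b : Nat) : natMin cs b ≤ b := by
  induction cs generalizing b with
  | nil => simp [natMin]
  | cons c rest ih =>
    calc natMin rest (min b c.length) ≤ min b c.length := ih _
    _ ≤ b := Nat.min_le_left _ _

theorem natMin_le_mem (cs : List (List Int)) (b : Nat) (x : List Int) (hx : x ∈ cs) :
    natMin cs b ≤ x.length := by
  induction cs generalizing b with
  | nil => cases hx
  | cons c rest ih =>
    rcases List.mem_cons.mp hx with h | h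
    · subst h
      calc natMin rest (min b x.length) ≤ min b x.length := natMin_le _ _
      _ ≤ x.length := Nat.min_le_right _ _
    · exact ih _ h

theorem natMin_realized (cs : List (List Int)) (b : Nat) :
    natMin cs b = b ∨ ∃ x ∈ cs, natMin cs b = x.length := by
  induction cs generalizing b with
  | nil => exact Or.inl rfl
  | cons c rest ih =>
    rcases ih (min b c.length) with h | ⟨x, hx, hxe⟩
    · rcases Nat.le_total b c.length with hb | hb
      · left; simpa [natMin, Nat.min_eq_left hb] using h
      · right; exact ⟨c, List.mem_cons_self, by simpa [natMin, Nat.min_eq_right hb] using h⟩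
    · right; exact ⟨x, List.mem_cons_of_mem _ hx, hxe⟩

-- the first min-by-length element has length = the running minimum of the lengths
theorem min?_len (c : List Int) (rest : List (List Int)) (m : List Int)
    (h : PySem.List.min? (c :: rest) (fun c => c.length) = some m) :
    m.length = natMin rest c.length := by
  have hmem := PySem.List.min?_mem h
  have hmin := PySem.List.min?_isMin h
  apply Nat.le_antisymm
  · rcases natMin_realized rest c.length with he | ⟨x, hx, he⟩
    · rw [he]; exact hmin c List.mem_cons_self
    · rw [he]; exact hmin x (List.mem_cons_of_mem _ hx)
  · rcases List.mem_cons.mp hmem with hm | hm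
    · subst hm; exact natMin_le _ _
    · exact natMin_le_mem _ _ _ hm

-- A's counting loop
theorem foldA_eq (literal : Int) (m : Nat) (cs : List (List Int)) (acc : Int) :
    cs.foldl (fun acc clause =>
      if clause.length = m then
        if literal ∈ clause ∨ -literal ∈ clause then acc + 1 else acc
      else acc) acc = acc + countMin literal m cs := by
  induction cs generalizing acc with
  | nil => simp [countMin]
  | cons c rest ih =>
    simp only [List.foldl_cons, countMin, ih]
    split_ifs with h1 h2 h3 <;> simp_all <;> ring

-- B's loop, once the first clause has seeded the state
theorem fAltLoop_eq (literal : Int) (rest : List (List Int)) (b : Nat) (cnt : Int) :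
    fAltLoop literal (some b) cnt rest =
      (if natMin rest b = b then cnt else 0) + countMin literal (natMin rest b) rest := by
  induction rest generalizing b cnt with
  | nil => simp [fAltLoop, natMin, countMin]
  | cons c rest ih =>
    have hM : natMin (c :: rest) b = natMin rest (min b c.length) := rfl
    by_cases h1 : c.length < b
    · have hmin : min b c.length = c.length := Nat.min_eq_right (Nat.le_of_lt h1)
      have hle : natMin rest c.length ≤ c.length := natMin_le _ _
      have hne : natMin rest c.length ≠ b := by omega
      simp only [fAltLoop, h1, if_pos, hM, hmin, ih, countMin, hne, if_neg]
      by_cases he : natMin rest c.length = c.length <;>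
        by_cases hl : literal ∈ c ∨ -literal ∈ c <;>
        simp [he, hl] <;> omega
    · by_cases h2 : c.length = b
      · subst h2
        have hmin : min c.length c.length = c.length := Nat.min_self _
        simp only [fAltLoop, h1, if_neg, if_pos, hM, hmin, ih, countMin]
        by_cases he : natMin rest c.length = c.length <;>
          by_cases hl : literal ∈ c ∨ -literal ∈ c <;>
          simp [he, hl] <;> omega
      · have hb : b < c.length := by omega
        have hmin : min b c.length = b := Nat.min_eq_left (Nat.le_of_lt hb)
        have hne : ¬ (c.length = natMin rest b) := by
          have := natMin_le rest b; omega
        simp only [fAltLoop, h1, h2, if_neg, hM, hmin, ih, countMin, hne, false_and, if_neg]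
        simp

-- ===== VERDICT (by name: the statement is the Claim_ definition above) =====
theorem f_spec : Claim_equal_f := by
  intro clauses literal _ hpre
  unfold Spec_f
  cases clauses with
  | nil => exact absurd rfl hpre
  | cons c rest =>
    rcases h : PySem.List.min? (c :: rest) (fun c => c.length) with _ | m
    · exact absurd ((PySem.List.min?_eq_none_iff _ _).mp h) (by simp)
    · have hlen := min?_len c rest m h
      show f (c :: rest) literal = f_alt (c :: rest) literal
      unfold f f_alt
      rw [h]
      simp only [foldA_eq, hlen]
      show 0 + countMin literal (natMin rest c.length) (c :: rest) =
        fAltLoop literal (some c.length) (if literal ∈ c ∨ -literal ∈ c then 1 else 0) rest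
      rw [fAltLoop_eq]
      simp only [countMin]
      by_cases he : natMin rest c.length = c.length <;>
        by_cases hl : literal ∈ c ∨ -literal ∈ c <;>
        simp [he, hl, Ne.symm] <;> omega
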